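-- pv_equiv track=rewrite | github.com/AswathRamana-KS/Mutli-Agent-Research-Python | config.py | get_agent_icon
-- ===== SOURCE A (Python) =====
-- CORE_AGENT_ICONS = {
--     "Manager": "🧠", "FactFinder": "🔍",
--     "Analyst": "📊", "Critic": "⚖️"
-- }
--
-- def get_agent_icon(role_name: str) -> str:
--     if role_name in CORE_AGENT_ICONS: return CORE_AGENT_ICONS[role_name]
--     # Assign icons based on keyword hints, fallback to a specialist icon
--     n = role_name.lower()
--     if any(k in n for k in ["tech", "engineer", "dev"]): return "⚙️"
--     if any(k in n for k in ["science", "bio", "chem"]): return "🔬"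
--     if any(k in n for k in ["law", "policy", "legal"]): return "📜"
--     if any(k in n for k in ["econ", "market", "finance"]): return "💰"
--     if any(k in n for k in ["psycho", "behave", "human", "social"]): return "🤝"
--     if any(k in n for k in ["game", "play", "design"]): return "🎮"
--     if any(k in n for k in ["health", "med", "doctor"]): return "⚕️"
--     return "💡"
-- ===== SOURCE B (Python) =====
-- CORE_AGENT_ICONS = {
--     "Manager": "🧠", "FactFinder": "🔍",
--     "Analyst": "📊", "Critic": "⚖️"
-- }
--
-- # Keyword -> rule priority (0 = A's first rule), icon per priority, fallback at 7.
-- KEYWORD_PRIORITY = {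
--     "tech": 0, "engineer": 0, "dev": 0,
--     "science": 1, "bio": 1, "chem": 1,
--     "law": 2, "policy": 2, "legal": 2,
--     "econ": 3, "market": 3, "finance": 3,
--     "psycho": 4, "behave": 4, "human": 4, "social": 4,
--     "game": 5, "play": 5, "design": 5,
--     "health": 6, "med": 6, "doctor": 6,
-- }
-- ICONS = ["⚙️", "🔬", "📜", "💰", "🤝", "🎮", "⚕️", "💡"]
--
-- def get_agent_icon(role_name: str) -> str:
--     if role_name in CORE_AGENT_ICONS:
--         return CORE_AGENT_ICONS[role_name]
--     # Single scan over string positions: keep the minimum priority of any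
--     # keyword occurring anywhere; first-match-over-rules == min priority.
--     n = role_name.lower()
--     best = 7
--     for i in range(len(n)):
--         for k, p in KEYWORD_PRIORITY.items():
--             if p < best and n.startswith(k, i):
--                 best = p
--     return ICONS[best]
-- ===== Notes on version B (the rewrite author's own statement) =====
-- stated objective: alternative
-- what changed: B replaces A's ordered cascade of per-rule any-substring tests by a single left-to-right scan over the string's positions that keeps the minimum priority of any keyword starting there (keyword->priority map, min accumulator), then indexes an icon table; correct because A returns the first rule with a keyword occurrence, i.e. the rule of minimal index.
import Mathlib
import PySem

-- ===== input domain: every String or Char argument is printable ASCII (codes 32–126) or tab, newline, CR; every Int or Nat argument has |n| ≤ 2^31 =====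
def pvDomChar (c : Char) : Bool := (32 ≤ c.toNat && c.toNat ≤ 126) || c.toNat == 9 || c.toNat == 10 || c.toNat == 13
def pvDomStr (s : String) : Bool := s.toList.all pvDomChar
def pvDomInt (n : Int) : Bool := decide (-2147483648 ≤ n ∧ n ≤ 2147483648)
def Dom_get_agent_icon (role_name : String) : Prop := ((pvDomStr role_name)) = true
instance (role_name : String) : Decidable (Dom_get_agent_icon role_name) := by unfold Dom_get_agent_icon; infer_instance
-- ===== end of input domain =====

-- B replaces A's cascade of per-rule substring tests by one position-scan keeping the
-- minimum keyword priority (alternative algorithm, same cost).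

-- ===== PORT A =====
def coreAgentIcons : PySem.Dict String String := PySem.Dict.ofList
  [("Manager", "🧠"), ("FactFinder", "🔍"), ("Analyst", "📊"), ("Critic", "⚖️")]

def get_agent_icon (role_name : String) : String :=
  match PySem.Dict.get? coreAgentIcons role_name with
  | some v => v
  | none =>
    let n := PySem.Str.lower role_name
    if ["tech", "engineer", "dev"].any (fun k => PySem.Str.isIn k n) then "⚙️"
    else if ["science", "bio", "chem"].any (fun k => PySem.Str.isIn k n) then "🔬"
    else if ["law", "policy", "legal"].any (fun k => PySem.Str.isIn k n) then "📜"
    else if ["econ", "market", "finance"].any (fun k => PySem.Str.isIn k n) then "💰"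
    else if ["psycho", "behave", "human", "social"].any (fun k => PySem.Str.isIn k n) then "🤝"
    else if ["game", "play", "design"].any (fun k => PySem.Str.isIn k n) then "🎮"
    else if ["health", "med", "doctor"].any (fun k => PySem.Str.isIn k n) then "⚕️"
    else "💡"

-- ===== PORT B =====
def kwPriority : List (String × Nat) :=
  [ ("tech", 0), ("engineer", 0), ("dev", 0)
  , ("science", 1), ("bio", 1), ("chem", 1)
  , ("law", 2), ("policy", 2), ("legal", 2)
  , ("econ", 3), ("market", 3), ("finance", 3)
  , ("psycho", 4), ("behave", 4), ("human", 4), ("social", 4)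
  , ("game", 5), ("play", 5), ("design", 5)
  , ("health", 6), ("med", 6), ("doctor", 6) ]

def icons : List String := ["⚙️", "🔬", "📜", "💰", "🤝", "🎮", "⚕️", "💡"]

-- inner loop: for k, p in KEYWORD_PRIORITY.items(): if p < best and n.startswith(k, i): best = p
def pvInner (s : List Char) (best : Nat) : Nat :=
  kwPriority.foldl
    (fun b kp => if kp.2 < b ∧ PySem.Chars.startswith s kp.1.toList = true then kp.2 else b) best

-- outer loop: for i in range(len(n)): the suffixes n[i:] for i = 0 .. len-1, in order,
-- are l.tails without its last element []
def pvScan (best : Nat) (l : List Char) : Nat :=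
  (l.tails.dropLast).foldl (fun b s => pvInner s b) best

def get_agent_icon_alt (role_name : String) : String :=
  match PySem.Dict.get? coreAgentIcons role_name with
  | some v => v
  | none =>
    -- ICONS[best]: best is always < 8, so the list index is exact via getD
    icons.getD (pvScan 7 (PySem.Str.lower role_name).toList) "💡"

-- ===== PRECONDITION & SPEC =====
def Spec_get_agent_icon (role_name : String) (out : String) : Prop := out = get_agent_icon_alt role_name
instance (role_name : String) (out : String) : Decidable (Spec_get_agent_icon role_name out) := by unfold Spec_get_agent_icon; infer_instance

-- ===== CLAIM (what is proved, stated in full; the proofs are below) =====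
def Claim_equal_get_agent_icon : Prop := ∀ (role_name : String), Dom_get_agent_icon role_name → Spec_get_agent_icon role_name (get_agent_icon role_name)

-- ===== LEMMAS AND PROOFS =====

set_option maxHeartbeats 1000000

-- generic min-accumulating fold over a keyword table, parametrised by a match predicate
def gmin (q : String × Nat → Bool) (K : List (String × Nat)) (b : Nat) : Nat :=
  K.foldl (fun a kp => if q kp then min a kp.2 else a) b

theorem gmin_le (q : String × Nat → Bool) :
    ∀ (K : List (String × Nat)) (b : Nat), gmin q K b ≤ b := by
  intro K
  induction K with
  | nil => intro b; simp [gmin]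
  | cons kp K ih =>
    intro b
    simp only [gmin, List.foldl_cons] at *
    refine le_trans (ih _) ?_
    split <;> omega

theorem gmin_min (q : String × Nat → Bool) :
    ∀ (K : List (String × Nat)) (b : Nat), b ≤ 7 → gmin q K b = min b (gmin q K 7) := by
  intro K
  induction K with
  | nil => intro b hb; simp [gmin]; omega
  | cons kp K ih =>
    intro b hb
    simp only [gmin, List.foldl_cons] at *
    have h1 : (if q kp then min b kp.2 else b) ≤ 7 := by split <;> omega
    have h2 : (if q kp then min 7 kp.2 else 7) ≤ 7 := by split <;> omega
    rw [ih _ h1, ih _ h2]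
    have h3 := gmin_le q K 7
    simp only [gmin] at h3
    by_cases hq : q kp <;> simp [hq] <;> omega

theorem gmin_or (q1 q2 : String × Nat → Bool) :
    ∀ (K : List (String × Nat)),
      gmin (fun kp => q1 kp || q2 kp) K 7 = min (gmin q1 K 7) (gmin q2 K 7) := by
  intro K
  induction K with
  | nil => simp [gmin]
  | cons kp K ih =>
    simp only [gmin, List.foldl_cons] at *
    have e1 : ∀ (q : String × Nat → Bool),
        List.foldl (fun a kp => if q kp then min a kp.2 else a)
          (if q kp then min 7 kp.2 else 7) K
        = min (if q kp then min 7 kp.2 else 7)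
            (List.foldl (fun a kp => if q kp then min a kp.2 else a) 7 K) := by
      intro q
      have := gmin_min q K (if q kp then min 7 kp.2 else 7) (by split <;> omega)
      simpa [gmin] using this
    rw [e1, e1, e1, ih]
    have g1 := gmin_le q1 K 7
    have g2 := gmin_le q2 K 7
    simp only [gmin] at g1 g2
    by_cases h1 : q1 kp <;> by_cases h2 : q2 kp <;> simp [h1, h2] <;> omega

theorem gmin_append (q : String × Nat → Bool) (K1 K2 : List (String × Nat)) :
    gmin q (K1 ++ K2) 7 = min (gmin q K1 7) (gmin q K2 7) := by
  unfold gmin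
  rw [List.foldl_append]
  have h1 : List.foldl (fun a kp => if q kp then min a kp.2 else a) 7 K1 ≤ 7 := gmin_le q K1 7
  have := gmin_min q K2 _ h1
  simpa [gmin] using this

theorem gmin_rule (p : String → Bool) (r : Nat) (hr : r ≤ 7) :
    ∀ (ks : List String),
      gmin (fun kp => p kp.1) (ks.map (fun k => (k, r))) 7 = if ks.any p then r else 7 := by
  intro ks
  induction ks with
  | nil => simp [gmin]
  | cons k ks ih =>
    simp only [List.map_cons, gmin, List.foldl_cons]
    have := gmin_min (fun kp => p kp.1) (ks.map (fun k => (k, r)))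
      (if p k then min 7 r else 7) (by split <;> omega)
    simp only [gmin] at this ih
    rw [this, ih]
    by_cases hp : p k <;> by_cases ha : ks.any p <;> simp [hp, ha] <;> omega

-- the guarded inner fold computes the same as the min-fold
theorem inner_eq_gmin (s : List Char) (b : Nat) :
    pvInner s b = gmin (fun kp => PySem.Chars.startswith s kp.1.toList) kwPriority b := by
  unfold pvInner gmin
  generalize kwPriority = K
  induction K generalizing b with
  | nil => rfl
  | cons kp K ih =>
    simp only [List.foldl_cons]
    have : (if kp.2 < b ∧ PySem.Chars.startswith s kp.1.toList = true then kp.2 else b)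
         = (if PySem.Chars.startswith s kp.1.toList then min b kp.2 else b) := by
      by_cases hs : PySem.Chars.startswith s kp.1.toList <;> by_cases hlt : kp.2 < b <;>
        simp [hs, hlt] <;> omega
    rw [this, ih]

theorem chars_isIn_cons (k : List Char) (c : Char) (rest : List Char) :
    PySem.Chars.isIn k (c :: rest)
      = (PySem.Chars.startswith (c :: rest) k || PySem.Chars.isIn k rest) := by
  by_cases h : PySem.Chars.isIn k (c :: rest) = true
  · have hinf := (PySem.Chars.isIn_iff_infix _ _).mp h
    rcases (List.infix_cons_iff).mp hinf with hp | hi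
    · rw [h, ((PySem.Chars.startswith_iff _ _).mpr hp : _ = true)]; simp
    · rw [h, ((PySem.Chars.isIn_iff_infix _ _).mpr hi : _ = true)]; simp
  · have h' : PySem.Chars.isIn k (c :: rest) = false := by
      cases hh : PySem.Chars.isIn k (c :: rest) <;> simp_all
    rw [h']
    have hninf := (PySem.Chars.isIn_eq_false_iff _ _).mp h'
    have hsw : PySem.Chars.startswith (c :: rest) k = false := by
      cases hh : PySem.Chars.startswith (c :: rest) k
      · rfl
      · exact absurd (List.infix_cons_iff.mpr (Or.inl ((PySem.Chars.startswith_iff _ _).mp hh))) hninf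
    have hir : PySem.Chars.isIn k rest = false := by
      cases hh : PySem.Chars.isIn k rest
      · rfl
      · exact absurd (List.infix_cons_iff.mpr (Or.inr ((PySem.Chars.isIn_iff_infix _ _).mp hh))) hninf
    rw [hsw, hir]; rfl

def qIsIn (l : List Char) : String × Nat → Bool := fun kp => PySem.Chars.isIn kp.1.toList l

theorem gmin_nil_str : gmin (qIsIn []) kwPriority 7 = 7 := by
  decide

theorem tails_ne_nil (l : List Char) : l.tails ≠ [] := by
  cases l <;> simp

theorem pvScan_cons (b : Nat) (c : Char) (rest : List Char) :
    pvScan b (c :: rest) = pvScan (pvInner (c :: rest) b) rest := by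
  unfold pvScan
  rw [List.tails_cons, List.dropLast_cons_of_ne_nil (tails_ne_nil rest), List.foldl_cons]

theorem scan_eq_gmin :
    ∀ (l : List Char) (b : Nat), b ≤ 7 →
      pvScan b l = min b (gmin (qIsIn l) kwPriority 7) := by
  intro l
  induction l with
  | nil =>
    intro b hb
    rw [gmin_nil_str]
    show b = min b 7
    omega
  | cons c rest ih =>
    intro b hb
    have hin : pvInner (c :: rest) b ≤ 7 := by
      rw [inner_eq_gmin]; exact le_trans (gmin_le _ _ _) hb
    rw [pvScan_cons, ih _ hin, inner_eq_gmin, gmin_min _ _ _ hb]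
    have hq : qIsIn (c :: rest)
            = (fun (kp : String × Nat) =>
                PySem.Chars.startswith (c :: rest) kp.1.toList || qIsIn rest kp) := by
      funext kp; exact chars_isIn_cons _ _ _
    rw [hq, gmin_or]
    omega

-- the concrete table splits into seven constant-priority rules
theorem gmin_split (p : String → Bool) :
    gmin (fun kp => p kp.1) kwPriority 7 =
      min (if ["tech", "engineer", "dev"].any p then 0 else 7)
      (min (if ["science", "bio", "chem"].any p then 1 else 7)
      (min (if ["law", "policy", "legal"].any p then 2 else 7)
      (min (if ["econ", "market", "finance"].any p then 3 else 7)
      (min (if ["psycho", "behave", "human", "social"].any p then 4 else 7)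
      (min (if ["game", "play", "design"].any p then 5 else 7)
           (if ["health", "med", "doctor"].any p then 6 else 7)))))) := by
  have e : kwPriority
      = (["tech", "engineer", "dev"].map (fun k => (k, 0)))
        ++ ((["science", "bio", "chem"].map (fun k => (k, 1)))
        ++ ((["law", "policy", "legal"].map (fun k => (k, 2)))
        ++ ((["econ", "market", "finance"].map (fun k => (k, 3)))
        ++ ((["psycho", "behave", "human", "social"].map (fun k => (k, 4)))
        ++ ((["game", "play", "design"].map (fun k => (k, 5)))
        ++ (["health", "med", "doctor"].map (fun k => (k, 6)))))))) := by rfl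
  rw [e, gmin_append, gmin_append, gmin_append, gmin_append, gmin_append, gmin_append,
      gmin_rule p 0 (by omega), gmin_rule p 1 (by omega), gmin_rule p 2 (by omega),
      gmin_rule p 3 (by omega), gmin_rule p 4 (by omega), gmin_rule p 5 (by omega),
      gmin_rule p 6 (by omega)]

theorem gmin_split_isIn (l : List Char) :
    gmin (qIsIn l) kwPriority 7 =
      min (if ["tech", "engineer", "dev"].any (fun k => PySem.Chars.isIn k.toList l) then 0 else 7)
      (min (if ["science", "bio", "chem"].any (fun k => PySem.Chars.isIn k.toList l) then 1 else 7)
      (min (if ["law", "policy", "legal"].any (fun k => PySem.Chars.isIn k.toList l) then 2 else 7)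
      (min (if ["econ", "market", "finance"].any (fun k => PySem.Chars.isIn k.toList l) then 3 else 7)
      (min (if ["psycho", "behave", "human", "social"].any (fun k => PySem.Chars.isIn k.toList l) then 4 else 7)
      (min (if ["game", "play", "design"].any (fun k => PySem.Chars.isIn k.toList l) then 5 else 7)
           (if ["health", "med", "doctor"].any (fun k => PySem.Chars.isIn k.toList l) then 6 else 7)))))) :=
  gmin_split (fun k => PySem.Chars.isIn k.toList l)

theorem final_table (m0 m1 m2 m3 m4 m5 m6 : Bool) :
    (if m0 then "⚙️" else if m1 then "🔬" else if m2 then "📜" else if m3 then "💰"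
      else if m4 then "🤝" else if m5 then "🎮" else if m6 then "⚕️" else "💡")
    = icons.getD
        (min 7 (min (if m0 then 0 else 7) (min (if m1 then 1 else 7) (min (if m2 then 2 else 7)
          (min (if m3 then 3 else 7) (min (if m4 then 4 else 7)
            (min (if m5 then 5 else 7) (if m6 then 6 else 7)))))))) "💡" := by
  cases m0 <;> cases m1 <;> cases m2 <;> cases m3 <;> cases m4 <;> cases m5 <;> cases m6 <;> rfl

-- ===== VERDICT (by name: the statement is the Claim_ definition above) =====
theorem get_agent_icon_spec : Claim_equal_get_agent_icon := by
  intro s _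
  unfold Spec_get_agent_icon get_agent_icon get_agent_icon_alt
  cases PySem.Dict.get? coreAgentIcons s with
  | some v => rfl
  | none =>
    simp only
    rw [scan_eq_gmin _ 7 (le_refl 7), gmin_split_isIn]
    simp only [PySem.Str.isIn_eq]
    exact final_table _ _ _ _ _ _ _
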